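-- pv_equiv track=rewrite | github.com/phuong27102000/NTRU_HRSS_KEM_SV | Draft_Phuong/ternary/poly.py | s3
-- ===== SOURCE A (Python) =====
-- def s3(m,n):
--     out = m.copy()
--     k = len(out)
--     while k>n:
--         out[k-1-n] += out.pop()
--         k-=1
--     while k<n-1:
--         out += [0]
--         k+=1
--     if k==n:
--         for i in range(0,n-1):
--             out[i] -= out[n-1]
--         out.pop()
--     for i in range(0,n-1):
--         out[i] %= 3
--         out[i] -= (out[i]>>1)*3
--     return out
-- ===== SOURCE B (Python) =====
-- def s3(m, n):
--     # Reduce mod x^n - 1 by bucketing indices mod n (no destructive pop loop),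
--     # then subtract the top coefficient (cyclotomic reduction) and center mod 3.
--     if len(m) >= n:
--         c = [0] * n
--         for j, v in enumerate(m):
--             c[j % n] += v
--         out = [c[i] - c[n - 1] for i in range(n - 1)]
--     else:
--         out = list(m) + [0] * (n - 1 - len(m))
--     return [((v + 1) % 3) - 1 for v in out]
-- ===== Notes on version B (the rewrite author's own statement) =====
-- stated objective: alternative
-- what changed: Replaces the destructive pop-and-fold loop plus in-place subtraction/centering loops with a non-destructive modular bucketing pass (c[j % n] += m[j]) followed by pure list comprehensions for the cyclotomic subtraction and mod-3 centering.
import Mathlib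
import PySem

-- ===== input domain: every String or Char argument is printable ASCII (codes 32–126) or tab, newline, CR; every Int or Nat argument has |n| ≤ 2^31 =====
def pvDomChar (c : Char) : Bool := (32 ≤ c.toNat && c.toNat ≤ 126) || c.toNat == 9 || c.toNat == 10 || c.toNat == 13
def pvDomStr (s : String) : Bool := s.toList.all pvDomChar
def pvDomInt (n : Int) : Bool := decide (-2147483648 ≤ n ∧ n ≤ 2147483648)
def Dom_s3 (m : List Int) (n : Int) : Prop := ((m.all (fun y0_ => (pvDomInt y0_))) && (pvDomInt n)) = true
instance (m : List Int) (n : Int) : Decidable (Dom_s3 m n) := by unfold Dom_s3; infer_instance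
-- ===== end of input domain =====

-- B replaces A's destructive pop-and-fold loop and in-place index loops by a
-- non-destructive modular bucketing pass plus pure list comprehensions (same cost).

-- ===== PORT A =====
-- while k > n: out[k-1-n] += out.pop(); k -= 1
-- (the '0 < out.length' guard only makes the recursion total; under Pre_s3 (1 ≤ n) it is implied by n < length)
def s3PopLoop (n : Int) (out : List Int) : List Int :=
  if h : 0 < out.length ∧ n < (out.length : Int) then
    s3PopLoop n (PySem.List.pySetD out.dropLast ((out.length : Int) - 1 - n)
      (PySem.List.pyGetD out ((out.length : Int) - 1 - n) 0 +
        PySem.List.pyGetD out ((out.length : Int) - 1) 0))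
  else out
termination_by out.length
decreasing_by simp [PySem.List.length_pySetD]; omega

-- while k < n-1: out += [0]; k += 1
def s3PadLoop (n : Int) (out : List Int) : List Int :=
  if h : (out.length : Int) < n - 1 then s3PadLoop n (out ++ [0]) else out
termination_by (n - 1 - (out.length : Int)).toNat
decreasing_by simp; omega

def s3 (m : List Int) (n : Int) : List Int :=
  let out := s3PadLoop n (s3PopLoop n m)
  -- if k == n: for i in range(0, n-1): out[i] -= out[n-1];  out.pop()
  let out :=
    if (out.length : Int) = n then
      ((PySem.List.pyRange 0 (n - 1) 1).foldl
        (fun o i => PySem.List.pySetD o i (PySem.List.pyGetD o i 0 - PySem.List.pyGetD o (n - 1) 0))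
        out).dropLast
    else out
  -- for i in range(0, n-1): out[i] %= 3; out[i] -= (out[i] >> 1) * 3
  (PySem.List.pyRange 0 (n - 1) 1).foldl
    (fun o i =>
      let o1 := PySem.List.pySetD o i (PySem.Int.mod (PySem.List.pyGetD o i 0) 3)
      PySem.List.pySetD o1 i
        (PySem.List.pyGetD o1 i 0 - PySem.Int.floordiv (PySem.List.pyGetD o1 i 0) 2 * 3))
    out

-- ===== PORT B =====
def s3_alt (m : List Int) (n : Int) : List Int :=
  let out :=
    if n ≤ (m.length : Int) then
      let c := (PySem.List.enumerate m).foldl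
        (fun c jv =>
          PySem.List.pySetD c (PySem.Int.mod jv.1 n)
            (PySem.List.pyGetD c (PySem.Int.mod jv.1 n) 0 + jv.2))
        (List.replicate n.toNat 0)
      (PySem.List.pyRange 0 (n - 1) 1).map
        (fun i => PySem.List.pyGetD c i 0 - PySem.List.pyGetD c (n - 1) 0)
    else m ++ List.replicate (n - 1 - (m.length : Int)).toNat 0
  out.map (fun v => PySem.Int.mod (v + 1) 3 - 1)

-- ===== PRECONDITION & SPEC =====
-- Pre_s3 excludes exactly n ≤ 0, where the Python A always raises IndexError (pop from / index into an exhausted list).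
def Pre_s3 (m : List Int) (n : Int) : Prop := 1 ≤ n
instance (m : List Int) (n : Int) : Decidable (Pre_s3 m n) := by unfold Pre_s3; infer_instance
def pvWitness_s3 : List Int × Int := ([1, 2, 3, 4, 5], 3)
def Spec_s3 (m : List Int) (n : Int) (out : List Int) : Prop := out = s3_alt m n
instance (m : List Int) (n : Int) (out : List Int) : Decidable (Spec_s3 m n out) := by unfold Spec_s3; infer_instance

-- ===== CLAIM (what is proved, stated in full; the proofs are below) =====
def Claim_equal_s3 : Prop := ∀ (m : List Int) (n : Int), Dom_s3 m n → Pre_s3 m n → Spec_s3 m n (s3 m n)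

-- ===== LEMMAS AND PROOFS =====

-- bucket sums: bsumF N s xs i = Σ over positions k of xs with (s+k) % N = i of xs[k]
def bsumF (N : Nat) : Nat → List Int → Nat → Int
  | _, [], _ => 0
  | s, x :: xs, i => (if s % N = i then x else 0) + bsumF N (s + 1) xs i

theorem bsumF_append (N : Nat) (s : Nat) (xs : List Int) (v : Int) (i : Nat) :
    bsumF N s (xs ++ [v]) i = bsumF N s xs i + (if (s + xs.length) % N = i then v else 0) := by
  induction xs generalizing s with
  | nil => simp [bsumF]
  | cons x xs ih =>
    simp only [List.cons_append, bsumF, ih (s + 1), List.length_cons]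
    have : s + 1 + xs.length = s + (xs.length + 1) := by omega
    rw [this]; ring_nf

theorem bsumF_set (N : Nat) (s : Nat) (xs : List Int) (j : Nat) (v : Int) (i : Nat)
    (hj : j < xs.length) :
    bsumF N s (xs.set j v) i
      = bsumF N s xs i + (if (s + j) % N = i then v - xs.getD j 0 else 0) := by
  induction xs generalizing s j with
  | nil => simp at hj
  | cons x xs ih =>
    cases j with
    | zero => simp [bsumF]; split <;> ring
    | succ j =>
      simp only [List.set_cons_succ, bsumF, List.getD_cons_succ]
      rw [ih (s + 1) j (by simpa using hj)]
      have : s + 1 + j = s + (j + 1) := by omega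
      rw [this]; ring

theorem bsumF_small (N : Nat) (s : Nat) (xs : List Int) (i : Nat)
    (h : s + xs.length ≤ N) :
    bsumF N s xs i = if s ≤ i ∧ i < s + xs.length then xs.getD (i - s) 0 else 0 := by
  induction xs generalizing s with
  | nil => simp [bsumF]
  | cons x xs ih =>
    simp only [bsumF, List.length_cons] at *
    rw [ih (s + 1) (by omega), Nat.mod_eq_of_lt (by omega)]
    by_cases hsi : s = i
    · subst hsi
      have hc : s ≤ s ∧ s < s + (xs.length + 1) := ⟨le_refl s, by omega⟩
      rw [if_pos hc]
      simp
    · simp only [if_neg hsi]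
      by_cases h2 : s + 1 ≤ i ∧ i < s + 1 + xs.length
      · rw [if_pos h2, if_pos (by omega)]
        have : i - s = (i - (s + 1)) + 1 := by omega
        simp [this]
      · rw [if_neg h2, if_neg (by omega)]; simp

-- A's pop loop computes exactly the bucket sums when N ≤ len(out)
theorem popLoop_spec (N : Nat) (hN : 1 ≤ N) (xs : List Int) (h : N ≤ xs.length) :
    (s3PopLoop (N : Int) xs).length = N ∧
      ∀ i, (s3PopLoop (N : Int) xs).getD i 0 = bsumF N 0 xs i := by
  fun_induction s3PopLoop (N : Int) xs with
  | case1 xs hg ih =>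
    have hlen : N + 1 ≤ xs.length := by
      have := hg.2; omega
    have hcast : (xs.length : Int) - 1 - (N : Int) = ((xs.length - 1 - N : Nat) : Int) := by
      omega
    have hcast2 : (xs.length : Int) - 1 = ((xs.length - 1 : Nat) : Int) := by omega
    rw [hcast, hcast2, PySem.List.pyGetD_natCast, PySem.List.pyGetD_natCast,
      PySem.List.pySetD_natCast] at ih ⊢
    set j := xs.length - 1 - N with hj
    set xs' := xs.dropLast.set j (xs.getD j 0 + xs.getD (xs.length - 1) 0) with hxs'
    have hlen' : xs'.length = xs.length - 1 := by
      simp [hxs', List.length_dropLast]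
    obtain ⟨ihl, ihv⟩ := ih (by omega)
    refine ⟨by rw [ihl], ?_⟩
    intro i
    rw [ihv i]
    have hxs : xs = xs.dropLast ++ [xs.getD (xs.length - 1) 0] := by
      conv_lhs => rw [← List.dropLast_append_getLast (l := xs) (by intro hnil; simp [hnil] at hlen)]
      congr 1
      rw [List.getLast_eq_getElem, List.getD_eq_getElem?_getD,
        List.getElem?_eq_getElem (by omega)]
      rfl
    have hdl : xs.dropLast.length = xs.length - 1 := by simp
    have hgd : xs.dropLast.getD j 0 = xs.getD j 0 := by
      rw [List.getD_eq_getElem?_getD, List.getD_eq_getElem?_getD,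
        List.getElem?_eq_getElem (by rw [hdl]; omega),
        List.getElem?_eq_getElem (by omega)]
      simp [List.getElem_dropLast]
    rw [hxs', bsumF_set N 0 _ j _ _ (by rw [hdl]; omega), hgd]
    conv_rhs => rw [hxs]
    rw [bsumF_append, hdl]
    have hmod : (0 + j) % N = (0 + (xs.length - 1)) % N := by
      simp only [Nat.zero_add, hj]
      conv_rhs => rw [Nat.mod_eq_sub_mod (by omega)]
    rw [hmod]
    ring_nf
  | case2 xs hg =>
    have hlen : xs.length = N := by omega
    refine ⟨hlen, ?_⟩
    intro i
    rw [bsumF_small N 0 xs i (by omega)]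
    by_cases hi : i < N
    · rw [if_pos (by omega)]; simp
    · rw [if_neg (by omega)]
      rw [List.getD_eq_getElem?_getD, List.getElem?_eq_none (by omega)]
      rfl

-- B's bucketing fold also computes the bucket sums
theorem bucket_spec (N : Nat) (hN : 1 ≤ N) (xs : List Int) (s : Nat) (c : List Int)
    (hc : c.length = N) :
    ((PySem.List.enumerate xs (s : Int)).foldl
        (fun c jv =>
          PySem.List.pySetD c (PySem.Int.mod jv.1 (N : Int))
            (PySem.List.pyGetD c (PySem.Int.mod jv.1 (N : Int)) 0 + jv.2)) c).length = N ∧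
      ∀ i,
        ((PySem.List.enumerate xs (s : Int)).foldl
          (fun c jv =>
            PySem.List.pySetD c (PySem.Int.mod jv.1 (N : Int))
              (PySem.List.pyGetD c (PySem.Int.mod jv.1 (N : Int)) 0 + jv.2)) c).getD i 0
          = c.getD i 0 + bsumF N s xs i := by
  induction xs generalizing s c with
  | nil => exact ⟨by simpa using hc, by intro i; simp [PySem.List.enumerate, bsumF]⟩
  | cons x xs ih =>
    rw [PySem.List.enumerate_cons]
    simp only [List.foldl_cons]
    rw [PySem.Int.mod_natCast, PySem.List.pyGetD_natCast, PySem.List.pySetD_natCast]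
    have hsn : s % N < N := Nat.mod_lt _ (by omega)
    set c' := c.set (s % N) (c.getD (s % N) 0 + x) with hc'
    have hlen' : c'.length = N := by simp [hc', hc]
    have hcast : (s : Int) + 1 = ((s + 1 : Nat) : Int) := by omega
    rw [hcast]
    obtain ⟨ihl, ihv⟩ := ih (s + 1) c' hlen'
    refine ⟨ihl, ?_⟩
    intro i
    rw [ihv i, bsumF]
    have hget : ∀ i, c'.getD i 0 = if s % N = i then c.getD (s % N) 0 + x else c.getD i 0 := by
      intro i
      by_cases hi : s % N = i
      · subst hi
        rw [hc', List.getD_eq_getElem?_getD, List.getElem?_set_self (by omega)]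
        simp
      · rw [hc', List.getD_eq_getElem?_getD, List.getElem?_set_ne (by omega),
          if_neg hi, List.getD_eq_getElem?_getD]
    rw [hget i]
    by_cases hi : s % N = i
    · rw [if_pos hi, if_pos hi, hi]; ring
    · rw [if_neg hi, if_neg hi]; ring

-- in-place update of the prefix [0, j), with an extra read at a fixed position c ≥ j
theorem foldl_set_prefix2 (g : Int → Int → Int) (L : List Int) (j c : Nat)
    (hjc : j ≤ c) (hcL : c < L.length) :
    (PySem.List.pyRange 0 (j : Int) 1).foldl
        (fun o i => PySem.List.pySetD o i (g (PySem.List.pyGetD o i 0) (PySem.List.pyGetD o (c : Int) 0))) L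
      = (L.take j).map (fun v => g v (L.getD c 0)) ++ L.drop j := by
  induction j with
  | zero => simp [PySem.List.pyRange_one_eq_nil]
  | succ j ih =>
    have hj1 : ((j + 1 : Nat) : Int) = (j : Int) + 1 := by push_cast; ring
    rw [hj1, PySem.List.pyRange_one_succ_right (by positivity), List.foldl_append]
    rw [ih (by omega)]
    set M := (L.take j).map (fun v => g v (L.getD c 0)) ++ L.drop j with hM
    have hlenpre : ((L.take j).map (fun v => g v (L.getD c 0))).length = j := by
      simp; omega
    have hMg : M.getD j 0 = L.getD j 0 := by
      rw [hM, List.getD_append_right _ _ _ _ (by rw [hlenpre])]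
      simp only [List.getD_eq_getElem?_getD, List.getElem?_drop, List.length_map,
        List.length_take]
      congr 2
      omega
    have hMc : M.getD c 0 = L.getD c 0 := by
      rw [hM, List.getD_append_right _ _ _ _ (by rw [hlenpre]; omega)]
      simp only [List.getD_eq_getElem?_getD, List.getElem?_drop, List.length_map,
        List.length_take]
      congr 2
      omega
    simp only [List.foldl_cons, List.foldl_nil]
    rw [PySem.List.pyGetD_natCast, PySem.List.pyGetD_natCast, PySem.List.pySetD_natCast]
    rw [hMg, hMc, hM, List.set_append_right _ _ (by rw [hlenpre]), hlenpre]
    rw [List.drop_eq_getElem_cons (show j < L.length by omega)]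
    simp only [Nat.sub_self, List.set_cons_zero]
    have hmap : ∀ (f : Int → Int), List.take (j+1) (List.map f L)
        = List.take j (List.map f L) ++ [f (L[j]'(by omega))] := by
      intro f
      rw [List.take_add_one, List.getElem?_map, List.getElem?_eq_getElem (by omega)]
      rfl
    simp [List.getD_eq_getElem?_getD,
      List.getElem?_eq_getElem (show j < L.length by omega), hmap]

-- in-place map over the whole list
theorem foldl_set_all (g : Int → Int) (L : List Int) (j : Nat) (hj : j = L.length) :
    (PySem.List.pyRange 0 (j : Int) 1).foldl
        (fun o i => PySem.List.pySetD o i (g (PySem.List.pyGetD o i 0))) L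
      = L.map g := by
  subst hj
  suffices h : ∀ (j : Nat), j ≤ L.length →
      (PySem.List.pyRange 0 (j : Int) 1).foldl
        (fun o i => PySem.List.pySetD o i (g (PySem.List.pyGetD o i 0))) L
      = (L.take j).map g ++ L.drop j by
    rw [h L.length (le_refl _)]; simp
  intro j hjL
  induction j with
  | zero => simp [PySem.List.pyRange_one_eq_nil]
  | succ j ih =>
    have hj1 : ((j + 1 : Nat) : Int) = (j : Int) + 1 := by push_cast; ring
    rw [hj1, PySem.List.pyRange_one_succ_right (by positivity), List.foldl_append]
    rw [ih (by omega)]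
    have hlenpre : ((L.take j).map g).length = j := by simp; omega
    simp only [List.foldl_cons, List.foldl_nil]
    rw [PySem.List.pyGetD_natCast, PySem.List.pySetD_natCast]
    rw [List.getD_append_right _ _ _ _ (by rw [hlenpre]), hlenpre]
    rw [List.set_append_right _ _ (by rw [hlenpre]), hlenpre]
    rw [List.drop_eq_getElem_cons (show j < L.length by omega)]
    simp only [Nat.sub_self, List.set_cons_zero]
    have hmap : ∀ (f : Int → Int), List.take (j+1) (List.map f L)
        = List.take j (List.map f L) ++ [f (L[j]'(by omega))] := by
      intro f
      rw [List.take_add_one, List.getElem?_map, List.getElem?_eq_getElem (by omega)]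
      rfl
    simp [List.getD_eq_getElem?_getD, List.getElem?_drop,
      List.getElem?_eq_getElem (show j < L.length by omega), hmap]

-- A's two centering statements collapse to one write of the centered value
theorem center_body_eq (o : List Int) (i : Int) (hi : 0 ≤ i) :
    (let o1 := PySem.List.pySetD o i (PySem.Int.mod (PySem.List.pyGetD o i 0) 3);
      PySem.List.pySetD o1 i
        (PySem.List.pyGetD o1 i 0 - PySem.Int.floordiv (PySem.List.pyGetD o1 i 0) 2 * 3))
      = PySem.List.pySetD o i
          (PySem.Int.mod (PySem.List.pyGetD o i 0) 3 -
            PySem.Int.floordiv (PySem.Int.mod (PySem.List.pyGetD o i 0) 3) 2 * 3) := by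
  simp only []
  by_cases h : i.toNat < o.length
  · have hget : PySem.List.pyGetD
        (PySem.List.pySetD o i (PySem.Int.mod (PySem.List.pyGetD o i 0) 3)) i 0
        = PySem.Int.mod (PySem.List.pyGetD o i 0) 3 := by
      rw [PySem.List.pySetD_of_nonneg _ _ hi,
        PySem.List.pyGetD_eq_getElem _ _ hi (by simp; omega)]
      exact List.getElem_set_self (by simpa using h)
    rw [hget, PySem.List.pySetD_of_nonneg _ _ hi, PySem.List.pySetD_of_nonneg _ _ hi,
      PySem.List.pySetD_of_nonneg _ _ hi, List.set_set]
  · have hnoop : ∀ v, PySem.List.pySetD o i v = o := by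
      intro v
      rw [PySem.List.pySetD_of_nonneg _ _ hi]
      exact List.set_eq_of_length_le (by omega)
    simp only [hnoop]

-- the centered value, written A's way, equals B's closed form
theorem center_eq (v : Int) :
    (PySem.Int.mod v 3 - PySem.Int.floordiv (PySem.Int.mod v 3) 2 * 3)
      = PySem.Int.mod (v + 1) 3 - 1 := by
  rw [PySem.Int.mod_eq_emod_of_pos (by norm_num), PySem.Int.mod_eq_emod_of_pos (by norm_num),
    PySem.Int.floordiv_eq_ediv_of_pos (by norm_num)]
  omega

theorem padLoop_eq (n : Int) (xs : List Int) :
    s3PadLoop n xs = xs ++ List.replicate (n - 1 - (xs.length : Int)).toNat 0 := by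
  fun_induction s3PadLoop n xs with
  | case1 xs h ih =>
    rw [ih]
    have h2 : (n - 1 - ((xs ++ [0]).length : Int)).toNat + 1 = (n - 1 - (xs.length:Int)).toNat := by
      simp; omega
    rw [← h2, List.replicate_succ, List.append_assoc]
    simp
  | case2 xs h => simp; omega

-- a mapped prefix, rewritten as a map over indices
theorem take_map_getD (L : List Int) (k : Nat) (hk : k ≤ L.length) (f : Int → Int) :
    (L.take k).map f = (List.range k).map (fun j => f (L.getD j 0)) := by
  apply List.ext_getElem
  · simp; omega
  · intro i h1 h2
    have hi : i < L.length := by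
      simp at h1
      omega
    simp only [List.getElem_map, List.getElem_take, List.getElem_range]
    congr 1
    rw [List.getD_eq_getElem?_getD, List.getElem?_eq_getElem hi]
    rfl

-- ===== VERDICT (by name: the statement is the Claim_ definition above) =====
theorem s3_spec : Claim_equal_s3 := by
  intro m n _ hpre
  unfold Pre_s3 at hpre
  obtain ⟨N, rfl⟩ : ∃ N : Nat, n = (N : Int) := ⟨n.toNat, by omega⟩
  have hN1 : 1 ≤ N := by omega
  unfold Spec_s3 s3 s3_alt
  simp only []
  -- the centering loop, rewritten as a pointwise map
  have hcenter : ∀ (L : List Int), ((N : Int) - 1) = (L.length : Int) →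
      (PySem.List.pyRange 0 ((N : Int) - 1) 1).foldl
        (fun o i =>
          PySem.List.pySetD (PySem.List.pySetD o i (PySem.Int.mod (PySem.List.pyGetD o i 0) 3)) i
            (PySem.List.pyGetD (PySem.List.pySetD o i (PySem.Int.mod (PySem.List.pyGetD o i 0) 3)) i 0 -
              PySem.Int.floordiv
                (PySem.List.pyGetD (PySem.List.pySetD o i (PySem.Int.mod (PySem.List.pyGetD o i 0) 3)) i 0) 2 * 3)) L
        = L.map (fun v => PySem.Int.mod (v + 1) 3 - 1) := by
    intro L hk
    rw [PySem.List.foldl_congr_mem _ _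
      (fun o i => PySem.List.pySetD o i
        (PySem.Int.mod (PySem.List.pyGetD o i 0) 3 -
          PySem.Int.floordiv (PySem.Int.mod (PySem.List.pyGetD o i 0) 3) 2 * 3)) _
      (by
        intro acc x hx
        exact center_body_eq acc x ((PySem.List.mem_pyRange_one.1 hx).1)), hk,
      foldl_set_all (fun v => PySem.Int.mod v 3 - PySem.Int.floordiv (PySem.Int.mod v 3) 2 * 3)
        L L.length rfl]
    exact List.map_congr_left (fun a _ => center_eq a)
  by_cases hcase : (N : Int) ≤ ((m.length : Nat) : Int)
  · -- len(m) >= n : pop loop ≡ bucketing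
    rw [if_pos hcase]
    have hNm : N ≤ m.length := by exact_mod_cast hcase
    obtain ⟨hPl, hPv⟩ := popLoop_spec N hN1 m hNm
    have hpad : s3PadLoop (N : Int) (s3PopLoop (N : Int) m) = s3PopLoop (N : Int) m := by
      rw [padLoop_eq]
      have h0 : ((N : Int) - 1 - ((s3PopLoop (N : Int) m).length : Int)).toNat = 0 := by
        rw [hPl]; omega
      rw [h0]
      simp
    rw [hpad, if_pos (by rw [hPl])]
    set P := s3PopLoop (N : Int) m with hPdef
    -- B's bucket list equals the pop-loop result
    obtain ⟨hCl, hCv⟩ := bucket_spec N hN1 m 0 (List.replicate N 0) (by simp)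
    have hCP : (PySem.List.enumerate m).foldl
        (fun c jv =>
          PySem.List.pySetD c (PySem.Int.mod jv.1 (N : Int))
            (PySem.List.pyGetD c (PySem.Int.mod jv.1 (N : Int)) 0 + jv.2))
        (List.replicate (N : Int).toNat 0) = P := by
      have he : PySem.List.enumerate m ((0 : Nat) : Int) = PySem.List.enumerate m := by
        norm_num
      have ht : ((N : Int).toNat) = N := by omega
      rw [ht, ← he]
      apply List.ext_getElem (by rw [hCl, hPl])
      intro i h1 h2
      have hgD : ∀ (K : List Int) (h : i < K.length), K[i]'h = K.getD i 0 := by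
        intro K h
        rw [List.getD_eq_getElem?_getD, List.getElem?_eq_getElem h]
        rfl
      rw [hgD _ h1, hgD _ h2, hCv i, hPv i]
      simp
    rw [hCP]
    -- the subtraction loop + pop, as a mapped prefix
    have hc1 : ((N : Int) - 1) = (((N - 1 : Nat) : Nat) : Int) := by omega
    rw [hc1, foldl_set_prefix2 (fun v t => v - t) P (N - 1) (N - 1) (le_refl _) (by omega),
      show (((N - 1 : Nat) : Nat) : Int) = (N : Int) - 1 from by omega]
    have hdrop : P.drop (N - 1) = [P.getD (N - 1) 0] := by
      rw [List.drop_eq_getElem_cons (by omega)]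
      rw [show (N - 1 + 1) = P.length by omega, List.drop_length]
      congr 1
      rw [List.getD_eq_getElem?_getD, List.getElem?_eq_getElem (by omega)]
      rfl
    rw [hdrop, List.dropLast_concat]
    rw [hcenter _ (by simp [hPl]; omega)]
    congr 1
    rw [take_map_getD P (N - 1) (by omega) _]
    rw [PySem.List.pyRange_one]
    simp only [sub_zero, List.map_map]
    rw [show ((N : Int) - 1).toNat = N - 1 from by omega]
    apply List.map_congr_left
    intro j hj
    have hjN : j < N - 1 := by simpa using hj
    simp only [Function.comp_apply, zero_add, PySem.List.pyGetD_natCast]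
    rw [show ((N : Int) - 1) = ((N - 1 : Nat) : Int) from by omega, PySem.List.pyGetD_natCast]
  · -- len(m) < n : no reduction, only zero-padding
    rw [if_neg hcase]
    have hm : m.length < N := by omega
    have hpop : s3PopLoop (N : Int) m = m := by
      rw [s3PopLoop]
      rw [dif_neg (by omega)]
    rw [hpop, padLoop_eq]
    set L0 := m ++ List.replicate ((N : Int) - 1 - ((m.length : Nat) : Int)).toNat 0 with hL0
    have hL0l : L0.length = N - 1 := by
      rw [hL0]
      simp
      omega
    rw [if_neg (by rw [hL0l]; omega)]
    exact hcenter L0 (by rw [hL0l]; omega)
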